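-- pv_equiv track=rewrite | github.com/einhornus/speech_recognition | subtitles/textual_anomalies.py | is_anomalous
-- ===== SOURCE A (Python) =====
-- MIN_LENGTH = 30
--
-- def is_anomalous(text):
--     if len(text) < MIN_LENGTH:
--         return False
--     else:
--         for l in range(1, 7):
--             folds = [text[i:i + l] for i in range(0, len(text), l)]
--             folds_set = set(folds)
--             if len(folds_set) <= 3:
--                 return True
--         return False
-- ===== SOURCE B (Python) =====
-- MIN_LENGTH = 30
--
-- def _distinct_sorted(srt):
--     # number of distinct values in an already-sorted list
--     if not srt:
--         return 0
--     distinct = 1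
--     prev = srt[0]
--     for cur in srt[1:]:
--         if cur != prev:
--             distinct += 1
--         prev = cur
--     return distinct
--
-- def is_anomalous(text):
--     if len(text) < MIN_LENGTH:
--         return False
--     for l in range(1, 7):
--         folds = [text[i:i + l] for i in range(0, len(text), l)]
--         if _distinct_sorted(sorted(folds)) <= 3:
--             return True
--     return False
-- ===== Notes on version B (the rewrite author's own statement) =====
-- stated objective: alternative
-- what changed: Replaces hash-set distinctness (len(set(folds))) with sort-then-scan distinctness: the chunks are sorted and the distinct count is obtained by counting adjacent-unequal pairs with a prev/counter loop.
import Mathlib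
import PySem

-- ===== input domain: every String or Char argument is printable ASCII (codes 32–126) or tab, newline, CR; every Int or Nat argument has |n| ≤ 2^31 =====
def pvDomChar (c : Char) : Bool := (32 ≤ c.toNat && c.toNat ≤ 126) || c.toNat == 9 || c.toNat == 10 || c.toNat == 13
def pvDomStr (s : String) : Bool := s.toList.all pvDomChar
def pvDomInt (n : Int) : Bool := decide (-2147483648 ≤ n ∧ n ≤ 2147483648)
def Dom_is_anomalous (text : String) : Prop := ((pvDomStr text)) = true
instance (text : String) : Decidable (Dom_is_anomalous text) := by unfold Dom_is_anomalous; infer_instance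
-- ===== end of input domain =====

-- B replaces A's hash-set distinct count with sort-then-scan distinctness (alternative decomposition, same results).

-- ===== PORT A =====
def is_anomalous (text : String) : Bool :=
  if PySem.Str.len text < 30 then false
  else
    (PySem.List.pyRange 1 7 1).any (fun l =>
      let folds := (PySem.List.pyRange 0 (PySem.Str.len text) l).map
        (fun i => PySem.Str.slice text (some i) (some (i + l)))
      let folds_set := PySem.Set.ofList folds
      decide (PySem.Set.len folds_set ≤ 3))

-- ===== PORT B =====
-- number of distinct values in an already-sorted list: 1 + adjacent-unequal pairs (0 for [])
def distinctSorted (srt : List String) : Int :=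
  match srt with
  | [] => 0
  | x :: xs =>
    (xs.foldl (fun st cur => (cur, if cur ≠ st.1 then st.2 + 1 else st.2)) (x, (1 : Int))).2

def is_anomalous_alt (text : String) : Bool :=
  if PySem.Str.len text < 30 then false
  else
    (PySem.List.pyRange 1 7 1).any (fun l =>
      let folds := (PySem.List.pyRange 0 (PySem.Str.len text) l).map
        (fun i => PySem.Str.slice text (some i) (some (i + l)))
      decide (distinctSorted (PySem.List.sorted folds (fun x => x) false) ≤ 3))

-- ===== PRECONDITION & SPEC =====
def Spec_is_anomalous (text : String) (out : Bool) : Prop := out = is_anomalous_alt text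
instance (text : String) (out : Bool) : Decidable (Spec_is_anomalous text out) := by unfold Spec_is_anomalous; infer_instance

-- ===== CLAIM (what is proved, stated in full; the proofs are below) =====
def Claim_equal_is_anomalous : Prop := ∀ (text : String), Dom_is_anomalous text → Spec_is_anomalous text (is_anomalous text)

-- ===== LEMMAS AND PROOFS =====

-- proof helper: count of adjacent changes seen from a previous element
def countChanges (p : String) : List String → Int
  | [] => 0
  | y :: ys => (if y ≠ p then 1 else 0) + countChanges y ys

theorem foldl_distinct (xs : List String) (x : String) (d : Int) :
    (xs.foldl (fun st cur => (cur, if cur ≠ st.1 then st.2 + 1 else st.2)) (x, d)).2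
      = d + countChanges x xs := by
  induction xs generalizing x d with
  | nil => simp [countChanges]
  | cons y ys ih =>
    simp only [List.foldl_cons, countChanges, ih]
    split <;> ring

theorem countChanges_card (xs : List String) (x : String)
    (h : (x :: xs).Pairwise (· ≤ ·)) :
    1 + countChanges x xs = ((x :: xs).toFinset.card : Int) := by
  induction xs generalizing x with
  | nil => simp [countChanges]
  | cons y ys ih =>
    have hyx : x ≤ y := (List.pairwise_cons.1 h).1 y (by simp)
    have htail : (y :: ys).Pairwise (· ≤ ·) := (List.pairwise_cons.1 h).2
    by_cases hxy : y = x
    · subst hxy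
      have h2 := ih y htail
      simp only [countChanges, ne_eq, not_true_eq_false, if_false, zero_add] at h2 ⊢
      simpa [Finset.insert_idem] using h2
    · have hnot : x ∉ (y :: ys).toFinset := by
        simp only [List.mem_toFinset, List.mem_cons]
        rintro (rfl | hx)
        · exact hxy rfl
        · -- x ∈ ys; then y ≤ x and x ≤ y force x = y
          have hyx2 : y ≤ x := (List.pairwise_cons.1 htail).1 x hx
          exact hxy (le_antisymm hyx2 hyx)
      have := ih y htail
      simp only [countChanges, if_pos (by simpa using hxy)]
      rw [List.toFinset_cons, Finset.card_insert_of_notMem hnot]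
      push_cast
      omega

theorem ofList_length_toFinset (l : List String) :
    (PySem.Set.ofList l).length = l.toFinset.card := by
  have hnd : (PySem.Set.ofList l).Nodup := PySem.Set.nodup_ofList l
  have hfin : (PySem.Set.ofList l).toFinset = l.toFinset := by
    apply Finset.ext
    intro a
    simp [List.mem_toFinset, PySem.Set.mem_ofList]
  rw [← List.toFinset_card_of_nodup hnd, hfin]

theorem distinctSorted_eq (l : List String) :
    distinctSorted (PySem.List.sorted l (fun x => x) false)
      = ((PySem.Set.ofList l).length : Int) := by
  have hperm : (PySem.List.sorted l (fun x => x) false).Perm l := PySem.List.sorted_perm l _ _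
  have hpw : (PySem.List.sorted l (fun x => x) false).Pairwise (fun a b => a ≤ b) := by
    simpa using PySem.List.sorted_pairwise l (fun x => x)
  rw [ofList_length_toFinset, ← List.toFinset_eq_of_perm _ _ hperm]
  cases hs : PySem.List.sorted l (fun x => x) false with
  | nil => simp [distinctSorted]
  | cons x xs =>
    rw [hs] at hpw
    simp only [distinctSorted, foldl_distinct]
    exact countChanges_card xs x hpw

-- ===== VERDICT (by name: the statement is the Claim_ definition above) =====
theorem is_anomalous_spec : Claim_equal_is_anomalous := by
  intro text _
  unfold Spec_is_anomalous is_anomalous is_anomalous_alt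
  split
  · rfl
  · congr 1
    funext l
    simp [distinctSorted_eq, PySem.Set.len]
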